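-- pv_equiv track=rewrite | github.com/amol179/DSA_Notes_Dump | USACO/CH_5/Sec_5.1/theme.py | check
-- ===== SOURCE A (Python) =====
-- def check(L, intervals):
--     """
--     Checks if a non-overlapping, repeated interval sequence of length L exists.
--     Uses rolling hash with verification to avoid collisions.
--     """
--     if L < 4:  # A theme must have at least 5 notes, so the interval sequence must have length >= 4.
--         return False
--
--     base = 257
--     mod = 10**9 + 7
--     n = len(intervals)
--
--     # Map intervals from [-87, 87] to a non-negative range for safer hashing.
--     mapped_intervals = [val + 87 for val in intervals]
--
--     # Calculate the hash of the first substring of length L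
--     hash_val = 0
--     power = 1
--     for i in range(L):
--         hash_val = (hash_val * base + mapped_intervals[i]) % mod
--         if i < L - 1:
--             power = (power * base) % mod
--
--     # 'seen' stores the first index where a hash value was encountered.
--     seen = {hash_val: 0}
--
--     # Slide the window across the rest of the interval array
--     for i in range(1, n - L + 1):
--         # Update hash value using the rolling hash technique
--         hash_val = (hash_val - mapped_intervals[i - 1] * power) % mod
--         hash_val = (hash_val * base + mapped_intervals[i + L - 1]) % mod
--
--         # Ensure the hash value remains positive
--         if hash_val < 0:
--             hash_val += mod
--
--         if hash_val in seen:
--             j = seen[hash_val]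
--             # Check for non-overlapping condition. A theme of length (L+1)
--             # requires the start of the second theme to be at least (L+1)
--             # positions after the start of the first.
--             if i - j >= L + 1:
--                 # IMPORTANT: Verify the match to prevent false positives from hash collisions.
--                 if intervals[i:i+L] == intervals[j:j+L]:
--                     return True # Verified match found.
--
--         # If we haven't seen this hash before, record its first position.
--         if hash_val not in seen:
--             seen[hash_val] = i
--
--     return False
-- ===== SOURCE B (Python) =====
-- def check(L, intervals):
--     """Same result as the rolling-hash version, but each window's hash is
--     recomputed directly (Horner) and the dict insert/gap test is folded into
--     one setdefault pass starting at i = 0."""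
--     if L < 4:
--         return False
--     MOD = 10**9 + 7
--     seen = {}
--     for i in range(len(intervals) - L + 1):
--         v = 0
--         for k in range(i, i + L):
--             v = (v * 257 + intervals[k] + 87) % MOD
--         j = seen.setdefault(v, i)
--         if i - j >= L + 1 and intervals[i:i+L] == intervals[j:j+L]:
--             return True
--     return False
-- ===== Notes on version B (the rewrite author's own statement) =====
-- stated objective: simpler
-- what changed: B drops the rolling-hash machinery (maintained power, subtract-multiply-mod update, negative-value fix, separate mapped list and pre-seeded dict) and instead recomputes each window's Horner hash from scratch, folding the gap test and the insert-only-if-absent rule into one setdefault pass that starts at i = 0 with an empty dict.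
import Mathlib
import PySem

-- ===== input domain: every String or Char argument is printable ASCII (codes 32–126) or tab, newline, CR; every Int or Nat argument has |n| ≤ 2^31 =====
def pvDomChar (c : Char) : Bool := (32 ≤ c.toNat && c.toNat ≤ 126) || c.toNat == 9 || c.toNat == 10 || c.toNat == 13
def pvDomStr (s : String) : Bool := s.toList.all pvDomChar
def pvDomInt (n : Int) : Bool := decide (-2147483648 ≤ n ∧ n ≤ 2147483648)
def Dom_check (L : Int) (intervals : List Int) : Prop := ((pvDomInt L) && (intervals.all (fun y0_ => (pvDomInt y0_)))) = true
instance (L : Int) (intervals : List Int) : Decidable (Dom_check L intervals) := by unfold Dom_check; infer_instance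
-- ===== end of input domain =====

-- B replaces A's rolling hash (maintained power, subtract-multiply-mod update, negative fix,
-- mapped list, pre-seeded dict) by recomputing each window's Horner hash directly and doing one
-- setdefault pass from i = 0 — simpler, same result on every input where A returns.


-- ===== PORT A =====
-- rolling hash with maintained power, pre-seeded dict, collision verification
def check (L : Int) (intervals : List Int) : Bool :=
  if L < 4 then false
  else
    let base : Int := 257
    let md : Int := 10 ^ 9 + 7
    let n : Int := PySem.List.len intervals
    let mapped : List Int := intervals.map (fun val => val + 87)
    -- for i in range(L): hash = (hash*base + mapped[i]) % mod; if i < L-1: power = (power*base) % mod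
    let hp : Int × Int := (PySem.List.pyRange 0 L 1).foldl
      (fun (s : Int × Int) i =>
        (PySem.Int.mod (s.1 * base + PySem.List.pyGetD mapped i 0) md,
         if i < L - 1 then PySem.Int.mod (s.2 * base) md else s.2))
      (0, 1)
    let power : Int := hp.2
    let st : Bool × Int × PySem.Dict Int Int := (PySem.List.pyRange 1 (n - L + 1) 1).foldl
      (fun s i =>
        if s.1 then s  -- already returned True
        else
          let h1 := PySem.Int.mod (s.2.1 - PySem.List.pyGetD mapped (i - 1) 0 * power) md
          let h2 := PySem.Int.mod (h1 * base + PySem.List.pyGetD mapped (i + L - 1) 0) md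
          let h3 := if h2 < 0 then h2 + md else h2
          let hit : Bool := match s.2.2.get? h3 with  -- if hash_val in seen: j = seen[hash_val] …
            | some j => decide (L + 1 ≤ i - j) &&
                (PySem.List.slice intervals (some i) (some (i + L)) ==
                 PySem.List.slice intervals (some j) (some (j + L)))
            | none => false
          if hit then (true, h3, s.2.2)
          else (false, h3, if s.2.2.contains h3 then s.2.2 else s.2.2.insert h3 i))
      (false, hp.1, (PySem.Dict.empty).insert hp.1 0)
    st.1

-- ===== PORT B =====
-- fresh Horner hash per window, one setdefault pass from i = 0 (the match renders dict.setdefault: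
-- it yields the stored index if the key is present, else inserts i and yields i)
def check_alt (L : Int) (intervals : List Int) : Bool :=
  if L < 4 then false
  else
    let md : Int := 10 ^ 9 + 7
    let st : Bool × PySem.Dict Int Int :=
      (PySem.List.pyRange 0 (PySem.List.len intervals - L + 1) 1).foldl
        (fun s i =>
          if s.1 then s  -- already returned True
          else
            let v := (PySem.List.pyRange i (i + L) 1).foldl
              (fun v k => PySem.Int.mod (v * 257 + PySem.List.pyGetD intervals k 0 + 87) md) 0
            let js : Int × PySem.Dict Int Int := match s.2.get? v with
              | some j => (j, s.2)
              | none => (i, s.2.insert v i)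
            if decide (L + 1 ≤ i - js.1) &&
               (PySem.List.slice intervals (some i) (some (i + L)) ==
                PySem.List.slice intervals (some js.1) (some (js.1 + L))) then
              (true, js.2)
            else (false, js.2))
        (false, PySem.Dict.empty)
    st.1

-- ===== PRECONDITION & SPEC =====
-- A raises IndexError (initial hash loop reads mapped_intervals[i] for i < L) exactly when
-- 4 ≤ L and len(intervals) < L; Pre_ excludes only those inputs.
def Pre_check (L : Int) (intervals : List Int) : Prop := L < 4 ∨ L ≤ (intervals.length : Int)
instance (L : Int) (intervals : List Int) : Decidable (Pre_check L intervals) := by unfold Pre_check; infer_instance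

def pvWitness_check : Int × List Int := (4, [1, 2, 0, 1, 9, 1, 2, 0, 1])

def Spec_check (L : Int) (intervals : List Int) (out : Bool) : Prop := out = check_alt L intervals
instance (L : Int) (intervals : List Int) (out : Bool) : Decidable (Spec_check L intervals out) := by unfold Spec_check; infer_instance

-- ===== CLAIM (what is proved, stated in full; the proofs are below) =====
def Claim_equal_check : Prop := ∀ (L : Int) (intervals : List Int), Dom_check L intervals → Pre_check L intervals → Spec_check L intervals (check L intervals)
-- ===== LEMMAS AND PROOFS =====

-- B's hash of the window starting at i (the inner fold of check_alt, verbatim)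
def pvH (L : Int) (intervals : List Int) (i : Int) : Int :=
  (PySem.List.pyRange i (i + L) 1).foldl
    (fun v k => PySem.Int.mod (v * 257 + PySem.List.pyGetD intervals k 0 + 87) (10 ^ 9 + 7)) 0

-- the mapped value at index k, in ZMod
def pvC (intervals : List Int) (k : Int) : ZMod 1000000007 :=
  ((PySem.List.pyGetD intervals k 0 + 87 : Int) : ZMod 1000000007)

-- the Horner value of a list of indices, in ZMod
def pvZ (intervals : List Int) (l : List Int) : ZMod 1000000007 :=
  l.foldl (fun v k => v * 257 + pvC intervals k) 0

-- A-side main-loop step (proof-side restatement of check's lambda)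
def pvStepA (L : Int) (intervals : List Int) (power : Int)
    (s : Bool × Int × PySem.Dict Int Int) (i : Int) : Bool × Int × PySem.Dict Int Int :=
  if s.1 then s
  else
    let h1 := PySem.Int.mod (s.2.1 - PySem.List.pyGetD (intervals.map (fun val => val + 87)) (i - 1) 0 * power) (10 ^ 9 + 7)
    let h2 := PySem.Int.mod (h1 * 257 + PySem.List.pyGetD (intervals.map (fun val => val + 87)) (i + L - 1) 0) (10 ^ 9 + 7)
    let h3 := if h2 < 0 then h2 + (10 ^ 9 + 7) else h2
    let hit : Bool := match s.2.2.get? h3 with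
      | some j => decide (L + 1 ≤ i - j) &&
          (PySem.List.slice intervals (some i) (some (i + L)) ==
           PySem.List.slice intervals (some j) (some (j + L)))
      | none => false
    if hit then (true, h3, s.2.2)
    else (false, h3, if s.2.2.contains h3 then s.2.2 else s.2.2.insert h3 i)

-- B-side main-loop step (proof-side restatement of check_alt's lambda)
def pvStepB (L : Int) (intervals : List Int)
    (s : Bool × PySem.Dict Int Int) (i : Int) : Bool × PySem.Dict Int Int :=
  if s.1 then s
  else
    let v := pvH L intervals i
    let js : Int × PySem.Dict Int Int := match s.2.get? v with
      | some j => (j, s.2)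
      | none => (i, s.2.insert v i)
    if decide (L + 1 ≤ i - js.1) &&
       (PySem.List.slice intervals (some i) (some (i + L)) ==
        PySem.List.slice intervals (some js.1) (some (js.1 + L))) then
      (true, js.2)
    else (false, js.2)

theorem pvCastMod (a : Int) :
    ((PySem.Int.mod a (10 ^ 9 + 7) : Int) : ZMod 1000000007) = (a : ZMod 1000000007) := by
  rw [PySem.Int.mod_eq_emod_of_pos (by norm_num)]
  rw [show ((10:Int)^9+7) = ((1000000007 : Nat) : Int) from by norm_num, ZMod.intCast_mod]

theorem pvCastInj (a b : Int) (ha0 : 0 ≤ a) (ha1 : a < 10 ^ 9 + 7) (hb0 : 0 ≤ b) (hb1 : b < 10 ^ 9 + 7)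
    (h : (a : ZMod 1000000007) = (b : ZMod 1000000007)) : a = b := by
  have hd : ((1000000007 : Nat) : Int) ∣ (a - b) := by
    rw [← ZMod.intCast_zmod_eq_zero_iff_dvd]
    push_cast
    rw [h]; ring
  have habs : |a - b| < ((1000000007 : Nat) : Int) := by
    rw [abs_lt]; constructor <;> [skip; skip] <;> omega
  have := Int.eq_zero_of_abs_lt_dvd hd habs
  omega

theorem pvFoldCast (intervals : List Int) (l : List Int) (v : Int) :
    ((l.foldl (fun v k => PySem.Int.mod (v * 257 + PySem.List.pyGetD intervals k 0 + 87) (10 ^ 9 + 7)) v : Int) : ZMod 1000000007)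
      = l.foldl (fun v k => v * 257 + pvC intervals k) ((v : Int) : ZMod 1000000007) := by
  induction l generalizing v with
  | nil => simp
  | cons k l ih =>
    simp only [List.foldl_cons]
    rw [ih, pvCastMod]
    congr 1
    push_cast [pvC]
    ring

theorem pvFoldRange (intervals : List Int) (l : List Int) (v : Int) (h0 : 0 ≤ v) (h1 : v < 10 ^ 9 + 7) :
    0 ≤ l.foldl (fun v k => PySem.Int.mod (v * 257 + PySem.List.pyGetD intervals k 0 + 87) (10 ^ 9 + 7)) v ∧
    l.foldl (fun v k => PySem.Int.mod (v * 257 + PySem.List.pyGetD intervals k 0 + 87) (10 ^ 9 + 7)) v < 10 ^ 9 + 7 := by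
  induction l generalizing v with
  | nil => exact ⟨h0, h1⟩
  | cons k l ih =>
    simp only [List.foldl_cons]
    exact ih (PySem.Int.mod (v * 257 + PySem.List.pyGetD intervals k 0 + 87) (10 ^ 9 + 7))
      (PySem.Int.mod_nonneg _ (by norm_num)) (PySem.Int.mod_lt _ (by norm_num))

theorem pvZFrom (intervals : List Int) (l : List Int) (init : ZMod 1000000007) :
    l.foldl (fun v k => v * 257 + pvC intervals k) init = init * 257 ^ l.length + pvZ intervals l := by
  unfold pvZ
  induction l generalizing init with
  | nil => simp
  | cons k l ih =>
    simp only [List.foldl_cons, List.length_cons, pow_succ]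
    rw [ih, ih (0 * 257 + pvC intervals k)]
    ring

theorem pvCastH (L : Int) (intervals : List Int) (i : Int) :
    ((pvH L intervals i : Int) : ZMod 1000000007) = pvZ intervals (PySem.List.pyRange i (i + L) 1) := by
  unfold pvH pvZ
  rw [pvFoldCast, Int.cast_zero]

theorem pvHRange (L : Int) (intervals : List Int) (i : Int) :
    0 ≤ pvH L intervals i ∧ pvH L intervals i < 10 ^ 9 + 7 := by
  exact pvFoldRange intervals _ 0 le_rfl (by norm_num)

theorem pvMappedGet (intervals : List Int) (k : Int) (h0 : 0 ≤ k) (h1 : k < (intervals.length : Int)) :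
    PySem.List.pyGetD (intervals.map (fun val => val + 87)) k 0 = PySem.List.pyGetD intervals k 0 + 87 := by
  have h1m : k < ((intervals.map (fun val => val + 87)).length : Int) := by simpa using h1
  rw [PySem.List.pyGetD_eq_getElem _ 0 h0 h1m, PySem.List.pyGetD_eq_getElem _ 0 h0 h1]
  simp

theorem pvPowFold (l : List Int) (pw : Int) :
    ((l.foldl (fun pw _ => PySem.Int.mod (pw * 257) (10 ^ 9 + 7)) pw : Int) : ZMod 1000000007)
      = (pw : ZMod 1000000007) * 257 ^ l.length := by
  induction l generalizing pw with
  | nil => simp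
  | cons k l ih =>
    simp only [List.foldl_cons]
    rw [ih, pvCastMod, List.length_cons, pow_succ]
    push_cast
    ring

-- A's initial loop: hash component = B's window-0 hash (when L ≤ n), power component ≡ 257^(L-1)
theorem pvInitHash (L : Int) (intervals : List Int) (_h4 : 4 ≤ L) (hn : L ≤ (intervals.length : Int)) :
    ((PySem.List.pyRange 0 L 1).foldl
      (fun (v : Int) i => PySem.Int.mod (v * 257 + PySem.List.pyGetD (intervals.map (fun val => val + 87)) i 0) (10 ^ 9 + 7)) 0)
    = pvH L intervals 0 := by
  unfold pvH
  rw [zero_add]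
  apply PySem.List.foldl_congr_mem
  intro acc x hx
  rw [PySem.List.mem_pyRange_one] at hx
  rw [pvMappedGet intervals x hx.1 (by omega)]
  congr 1
  ring

theorem pvInitPow (L : Int) (h4 : 4 ≤ L) :
    (((PySem.List.pyRange 0 L 1).foldl
      (fun (pw : Int) i => if i < L - 1 then PySem.Int.mod (pw * 257) (10 ^ 9 + 7) else pw) 1 : Int) : ZMod 1000000007)
    = 257 ^ (L - 1).toNat := by
  have hsplit : PySem.List.pyRange 0 L 1 = PySem.List.pyRange 0 (L - 1) 1 ++ [L - 1] := by
    have h := PySem.List.pyRange_one_succ_right (a := 0) (b := L - 1) (by omega)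
    rw [show L - 1 + 1 = L from by ring] at h
    exact h
  rw [hsplit, List.foldl_append]
  have hbody : ((PySem.List.pyRange 0 (L - 1) 1).foldl
      (fun (pw : Int) i => if i < L - 1 then PySem.Int.mod (pw * 257) (10 ^ 9 + 7) else pw) 1)
      = (PySem.List.pyRange 0 (L - 1) 1).foldl (fun (pw : Int) _ => PySem.Int.mod (pw * 257) (10 ^ 9 + 7)) 1 := by
    apply PySem.List.foldl_congr_mem
    intro acc x hx
    rw [PySem.List.mem_pyRange_one] at hx
    rw [if_pos hx.2]
  rw [hbody]
  rw [List.foldl_cons, List.foldl_nil, if_neg (lt_irrefl (L - 1)), pvPowFold]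
  simp [PySem.List.length_pyRange_one]

-- Horner-value decompositions of a window
theorem pvZCons (intervals : List Int) (k : Int) (l : List Int) :
    pvZ intervals (k :: l) = pvC intervals k * 257 ^ l.length + pvZ intervals l := by
  have h : pvZ intervals (k :: l)
      = l.foldl (fun v k => v * 257 + pvC intervals k) (0 * 257 + pvC intervals k) := rfl
  rw [h, pvZFrom]
  ring

theorem pvZAppend (intervals : List Int) (l : List Int) (k : Int) :
    pvZ intervals (l ++ [k]) = pvZ intervals l * 257 + pvC intervals k := by
  unfold pvZ
  rw [List.foldl_append]
  simp

-- the rolling-hash step applied to the hash of window i-1 yields the hash of window i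
theorem pvHashStep (L : Int) (intervals : List Int) (power i : Int) (h4 : 4 ≤ L)
    (hi : 1 ≤ i) (hiL : i + L ≤ (intervals.length : Int))
    (hpw : ((power : Int) : ZMod 1000000007) = 257 ^ (L - 1).toNat) :
    PySem.Int.mod (PySem.Int.mod (pvH L intervals (i - 1)
        - PySem.List.pyGetD (intervals.map (fun val => val + 87)) (i - 1) 0 * power) (10 ^ 9 + 7) * 257
        + PySem.List.pyGetD (intervals.map (fun val => val + 87)) (i + L - 1) 0) (10 ^ 9 + 7)
      = pvH L intervals i := by
  rw [pvMappedGet intervals (i - 1) (by omega) (by omega),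
      pvMappedGet intervals (i + L - 1) (by omega) (by omega)]
  apply pvCastInj _ _ (PySem.Int.mod_nonneg _ (by norm_num)) (PySem.Int.mod_lt _ (by norm_num))
    (pvHRange L intervals i).1 (pvHRange L intervals i).2
  rw [pvCastMod]
  push_cast
  rw [show ((1000000007 : Int)) = 10 ^ 9 + 7 from by norm_num, pvCastMod]
  push_cast
  rw [pvCastH, pvCastH]
  have hA : pvZ intervals (PySem.List.pyRange (i - 1) (i - 1 + L) 1)
      = pvC intervals (i - 1) * 257 ^ (L - 1).toNat
        + pvZ intervals (PySem.List.pyRange i (i - 1 + L) 1) := by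
    rw [PySem.List.pyRange_one_cons (by omega : i - 1 < i - 1 + L),
        show i - 1 + 1 = i from by ring, pvZCons, PySem.List.length_pyRange_one,
        show i - 1 + L - i = L - 1 from by ring]
  have hB : pvZ intervals (PySem.List.pyRange i (i + L) 1)
      = pvZ intervals (PySem.List.pyRange i (i - 1 + L) 1) * 257 + pvC intervals (i + L - 1) := by
    have hsp : PySem.List.pyRange i (i + L) 1
        = PySem.List.pyRange i (i + L - 1) 1 ++ [i + L - 1] := by
      have h := PySem.List.pyRange_one_succ_right (a := i) (b := i + L - 1) (by omega)
      rw [show i + L - 1 + 1 = i + L from by ring] at h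
      exact h
    rw [hsp, pvZAppend, show i + L - 1 = i - 1 + L from by ring]
  rw [hB, hA, hpw]
  push_cast [pvC]
  ring

theorem pvFrozenA (L : Int) (intervals : List Int) (power : Int) (l : List Int) (s : Bool × Int × PySem.Dict Int Int)
    (h : s.1 = true) : l.foldl (pvStepA L intervals power) s = s := by
  induction l with
  | nil => rfl
  | cons x l ih =>
    rw [List.foldl_cons, show pvStepA L intervals power s x = s from by simp [pvStepA, h]]
    exact ih

theorem pvFrozenB (L : Int) (intervals : List Int) (l : List Int) (s : Bool × PySem.Dict Int Int)
    (h : s.1 = true) : l.foldl (pvStepB L intervals) s = s := by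
  induction l with
  | nil => rfl
  | cons x l ih =>
    rw [List.foldl_cons, show pvStepB L intervals s x = s from by simp [pvStepB, h]]
    exact ih

-- main loop alignment
theorem pvLoopEq (L : Int) (intervals : List Int) (power : Int) (h4 : 4 ≤ L)
    (hpw : ((power : Int) : ZMod 1000000007) = 257 ^ (L - 1).toNat) :
    ∀ (t : Nat) (a : Int) (d : PySem.Dict Int Int), 1 ≤ a →
      ((intervals.length : Int) - L + 1 - a).toNat = t →
      ((PySem.List.pyRange a ((intervals.length : Int) - L + 1) 1).foldl (pvStepA L intervals power)
        (false, pvH L intervals (a - 1), d)).1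
      = ((PySem.List.pyRange a ((intervals.length : Int) - L + 1) 1).foldl (pvStepB L intervals)
        (false, d)).1 := by
  intro t
  induction t with
  | zero =>
    intro a d ha hta
    rw [PySem.List.pyRange_one_eq_nil (by omega)]
    rfl
  | succ t ih =>
    intro a d ha hta
    have hlt : a < (intervals.length : Int) - L + 1 := by omega
    rw [PySem.List.pyRange_one_cons hlt, List.foldl_cons, List.foldl_cons]
    have hstep := pvHashStep L intervals power a h4 ha (by omega) hpw
    have hnotlt : ¬ (PySem.Int.mod (PySem.Int.mod (pvH L intervals (a - 1)
        - PySem.List.pyGetD (intervals.map (fun val => val + 87)) (a - 1) 0 * power) (10 ^ 9 + 7) * 257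
        + PySem.List.pyGetD (intervals.map (fun val => val + 87)) (a + L - 1) 0) (10 ^ 9 + 7) < 0) :=
      not_lt.mpr (PySem.Int.mod_nonneg _ (by norm_num))
    simp only [pvStepA, pvStepB, Bool.false_eq_true, if_false]
    rw [if_neg hnotlt, hstep]
    cases hj : d.get? (pvH L intervals a) with
    | none =>
      have hcont : d.contains (pvH L intervals a) = false := by
        rw [PySem.Dict.contains_eq_isSome_get?, hj]
        rfl
      simp only [hcont, Bool.false_eq_true, if_false, sub_self]
      rw [if_neg (by simp; omega)]
      have h1 := ih (a + 1) (d.insert (pvH L intervals a) a) (by omega) (by omega)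
      rw [show a + 1 - 1 = a from by ring] at h1
      exact h1
    | some j =>
      by_cases hc : (L + 1 ≤ a - j)
          ∧ PySem.List.slice intervals (some a) (some (a + L))
            = PySem.List.slice intervals (some j) (some (j + L))
      · have hcond : (decide (L + 1 ≤ a - j)
            && (PySem.List.slice intervals (some a) (some (a + L))
                == PySem.List.slice intervals (some j) (some (j + L)))) = true := by
          simp [hc.1, hc.2]
        simp only [hcond, if_true]
        rw [pvFrozenA L intervals power _ _ rfl, pvFrozenB L intervals _ _ rfl]
      · have hcond : (decide (L + 1 ≤ a - j)
            && (PySem.List.slice intervals (some a) (some (a + L))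
                == PySem.List.slice intervals (some j) (some (j + L)))) = false := by
          rcases not_and_or.mp hc with h | h
          · simp [h]
          · simp [h]
        have hcont : d.contains (pvH L intervals a) = true := by
          rw [PySem.Dict.contains_eq_isSome_get?, hj]
          rfl
        simp only [hcond, Bool.false_eq_true, if_false, hcont, if_true]
        have h1 := ih (a + 1) d (by omega) (by omega)
        rw [show a + 1 - 1 = a from by ring] at h1
        exact h1

theorem pvCheckA_eq (L : Int) (intervals : List Int) (h : ¬ L < 4) :
    check L intervals =
      ((PySem.List.pyRange 1 ((intervals.length : Int) - L + 1) 1).foldl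
        (pvStepA L intervals
          ((PySem.List.pyRange 0 L 1).foldl
            (fun (pw : Int) i => if i < L - 1 then PySem.Int.mod (pw * 257) (10 ^ 9 + 7) else pw) 1))
        (false,
         (PySem.List.pyRange 0 L 1).foldl
            (fun (v : Int) i => PySem.Int.mod (v * 257 + PySem.List.pyGetD (intervals.map (fun val => val + 87)) i 0) (10 ^ 9 + 7)) 0,
         (PySem.Dict.empty).insert
           ((PySem.List.pyRange 0 L 1).foldl
            (fun (v : Int) i => PySem.Int.mod (v * 257 + PySem.List.pyGetD (intervals.map (fun val => val + 87)) i 0) (10 ^ 9 + 7)) 0) 0)).1 := by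
  unfold check
  rw [if_neg h]
  simp only [PySem.List.len_eq]
  rw [PySem.List.foldl_prod_mk
    (f := fun (v : Int) i => PySem.Int.mod (v * 257 + PySem.List.pyGetD (intervals.map (fun val => val + 87)) i 0) (10 ^ 9 + 7))
    (g := fun (pw : Int) i => if i < L - 1 then PySem.Int.mod (pw * 257) (10 ^ 9 + 7) else pw)]
  rfl

theorem pvCheckB_eq (L : Int) (intervals : List Int) (h : ¬ L < 4) :
    check_alt L intervals =
      ((PySem.List.pyRange 0 ((intervals.length : Int) - L + 1) 1).foldl (pvStepB L intervals)
        (false, PySem.Dict.empty)).1 := by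
  unfold check_alt
  rw [if_neg h]
  simp only [PySem.List.len_eq]
  rfl

-- ===== VERDICT (by name: the statement is the Claim_ definition above) =====
theorem check_spec : Claim_equal_check := by
  intro L intervals _hdom hpre
  unfold Spec_check
  by_cases h : L < 4
  · simp [check, check_alt, h]
  · have h4 : 4 ≤ L := by omega
    have hn : L ≤ (intervals.length : Int) := by
      rcases hpre with h' | h'
      · omega
      · exact h'
    rw [pvCheckA_eq L intervals h, pvCheckB_eq L intervals h, pvInitHash L intervals h4 hn]
    have hpw := pvInitPow L h4
    have hK : (0 : Int) < (intervals.length : Int) - L + 1 := by omega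
    rw [PySem.List.pyRange_one_cons hK, List.foldl_cons]
    have hstep0 : pvStepB L intervals (false, PySem.Dict.empty) 0
        = (false, PySem.Dict.empty.insert (pvH L intervals 0) 0) := by
      simp only [pvStepB, Bool.false_eq_true, if_false, PySem.Dict.get?_empty, sub_self]
      rw [if_neg (by simp; omega)]
    rw [hstep0]
    have h1 := pvLoopEq L intervals _ h4 hpw ((intervals.length : Int) - L + 1 - 1).toNat 1
      (PySem.Dict.empty.insert (pvH L intervals 0) 0) le_rfl rfl
    rw [show (1 : Int) - 1 = 0 from by ring] at h1
    exact h1
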